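-- pv_equiv track=rewrite | github.com/ningyuan-xie/leetcode | 01-easy/q02269_find_the_k_beauty_of_a_number.py | divisorSubstrings
-- ===== SOURCE A (Python) =====
-- def divisorSubstrings(num: int, k: int) -> int:
--     """Optimal Solution: Sliding Window. Time Complexity: O(n), Space Complexity: O(1)."""
--     # Convert the integer to a string
--     num_str = str(num)  # 240 -> "240"
--     # Initialize the window size and the number of substrings
--     window_size = k
--     num_substrings = 0
--
--     # Iterate through the string
--     for i in range(len(num_str) - window_size + 1):
--         # Extract the substring of length k
--         sub_str = num_str[i:i + window_size]
--         # Convert the substring to an integer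
--         sub_int = int(sub_str)
--         # Check if the substring is a divisor of the number
--         if sub_int != 0 and num % sub_int == 0:
--             # Increment the number of substrings
--             num_substrings += 1
--
--     return num_substrings
-- ===== SOURCE B (Python) =====
-- def divisorSubstrings(num: int, k: int) -> int:
--     """Alternative: build the window list by recursion on suffixes, then filter and count."""
--     def windows(t):
--         # all length-k substrings of t, by structural recursion on the suffixes of t
--         return [] if len(t) < k else [t[:k]] + windows(t[1:])
--
--     vals = [int(w) for w in windows(str(num))]
--     return len([v for v in vals if v != 0 and num % v == 0])
-- ===== Notes on version B (the rewrite author's own statement) =====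
-- stated objective: alternative
-- what changed: B generates the length-k window list by structural recursion on the suffixes of str(num) and counts divisors with a comprehension filter plus len, instead of A's indexed for-loop that re-slices the string at each position and maintains a running counter.
import Mathlib
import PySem

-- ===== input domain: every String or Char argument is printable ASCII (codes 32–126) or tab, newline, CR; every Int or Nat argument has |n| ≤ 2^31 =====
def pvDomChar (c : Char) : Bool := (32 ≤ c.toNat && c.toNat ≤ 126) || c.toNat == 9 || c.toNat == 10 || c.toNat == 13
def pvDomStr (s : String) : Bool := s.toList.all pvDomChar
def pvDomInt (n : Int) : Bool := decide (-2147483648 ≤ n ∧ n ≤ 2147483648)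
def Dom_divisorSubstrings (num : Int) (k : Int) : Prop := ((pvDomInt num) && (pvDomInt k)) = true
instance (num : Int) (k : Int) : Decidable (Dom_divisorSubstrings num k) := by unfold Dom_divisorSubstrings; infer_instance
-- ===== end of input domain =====

-- B builds the length-k window list by recursion on the suffixes of str(num) and counts by filter+len,
-- instead of A's indexed loop that re-slices the string and keeps a running counter (objective: alternative).


-- ===== PORT A =====
def divisorSubstrings (num : Int) (k : Int) : Int :=
  let numStr := PySem.Int.toStr num
  let windowSize := k
  (PySem.List.pyRange 0 (PySem.Str.len numStr - windowSize + 1) 1).foldl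
    (fun numSubstrings i =>
      let subStr := PySem.Str.slice numStr (some i) (some (i + windowSize))
      match PySem.Int.ofStr? subStr with   -- none = int() raises ValueError; excluded by Pre_
      | some subInt =>
          if subInt ≠ 0 ∧ PySem.Int.mod num subInt = 0 then numSubstrings + 1 else numSubstrings
      | none => numSubstrings)
    0

-- ===== PORT B =====
-- Source B's inner 'windows': all length-k substrings, by structural recursion on the suffixes
def windowsB (k : Int) : List Char → List (List Char)
  | [] => []                         -- Python: len('') < k for every k ≥ 1 (k ≤ 0 is excluded by Pre_)
  | c :: rest =>
      if ((c :: rest).length : Int) < k then []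
      else PySem.List.slice (c :: rest) none (some k) :: windowsB k rest

def divisorSubstrings_alt (num : Int) (k : Int) : Int :=
  let vals := (windowsB k (PySem.Int.toStr num).toList).map (fun w => PySem.Int.ofChars? w)
  -- [int(w) …]: none = int() raises ValueError (excluded by Pre_); the filter drops it
  ((vals.filter (fun v? =>
      match v? with
      | some v => decide (v ≠ 0 ∧ PySem.Int.mod num v = 0)
      | none => false)).length : Int)

-- ===== PRECONDITION & SPEC =====
-- Pre_ excludes exactly the inputs on which Python A raises ValueError in int():
-- k ≤ 0 (int of an empty slice), and num < 0 with k = 1 (int of the slice "-").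
def Pre_divisorSubstrings (num : Int) (k : Int) : Prop := 1 ≤ k ∧ (0 ≤ num ∨ 2 ≤ k)
instance (num : Int) (k : Int) : Decidable (Pre_divisorSubstrings num k) := by
  unfold Pre_divisorSubstrings; infer_instance
def pvWitness_divisorSubstrings : Int × Int := (240, 2)

def Spec_divisorSubstrings (num : Int) (k : Int) (out : Int) : Prop := out = divisorSubstrings_alt num k
instance (num : Int) (k : Int) (out : Int) : Decidable (Spec_divisorSubstrings num k out) := by
  unfold Spec_divisorSubstrings; infer_instance

-- ===== CLAIM (what is proved, stated in full; the proofs are below) =====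
def Claim_equal_divisorSubstrings : Prop := ∀ (num : Int) (k : Int), Dom_divisorSubstrings num k → Pre_divisorSubstrings num k → Spec_divisorSubstrings num k (divisorSubstrings num k)

-- ===== LEMMAS AND PROOFS =====

-- the Bool test both counts share, applied to a raw window of str(num)
def hitB (num : Int) (w : List Char) : Bool :=
  match PySem.Int.ofChars? w with
  | some v => decide (v ≠ 0 ∧ PySem.Int.mod num v = 0)
  | none => false

lemma pyRange_nil_of_nonpos (m : Int) (h : m ≤ 0) : PySem.List.pyRange 0 m 1 = [] := by
  refine List.eq_nil_iff_forall_not_mem.2 ?_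
  intro x hx
  rw [PySem.List.mem_pyRange_one] at hx
  omega

-- windowsB k t is exactly the list of the k-windows (t.drop i).take k.toNat, i < t.length + 1 - k.toNat
lemma windowsB_eq (k : Int) (hk : 1 ≤ k) (t : List Char) :
    windowsB k t =
      (List.range (t.length + 1 - k.toNat)).map (fun i => (t.drop i).take k.toNat) := by
  have hK : 1 ≤ k.toNat := by omega
  induction t with
  | nil => simp [windowsB, Nat.sub_eq_zero_of_le hK]
  | cons c rest ih =>
    rw [windowsB]
    split
    next h =>
      simp only [List.length_cons, Nat.cast_add, Nat.cast_one] at h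
      have h0 : (c :: rest).length + 1 - k.toNat = 0 := by
        simp only [List.length_cons]; omega
      rw [h0]; simp
    next h =>
      simp only [List.length_cons, Nat.cast_add, Nat.cast_one, not_lt] at h
      have hsucc : (c :: rest).length + 1 - k.toNat = (rest.length + 1 - k.toNat) + 1 := by
        simp only [List.length_cons]; omega
      rw [hsucc, List.range_succ_eq_map, List.map_cons, List.map_map, ih,
        PySem.List.slice_to _ (by omega : (0:Int) ≤ k)]
      simp [Function.comp_def]

-- A's indexed loop counts exactly the windows passing hitB
lemma portA_count (num k : Int) (hk : 1 ≤ k) :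
    divisorSubstrings num k =
      ((List.range ((PySem.Int.toStr num).toList.length + 1 - k.toNat)).countP
        (fun i => hitB num (((PySem.Int.toStr num).toList.drop i).take k.toNat)) : Int) := by
  have hkK : ((k.toNat : Int)) = k := Int.toNat_of_nonneg (by omega)
  unfold divisorSubstrings
  simp only [PySem.Str.len_eq]
  by_cases hbig : (PySem.Int.toStr num).toList.length + 1 ≤ k.toNat
  · rw [pyRange_nil_of_nonpos _ (by omega), Nat.sub_eq_zero_of_le hbig]
    simp
  · have hle : k.toNat ≤ (PySem.Int.toStr num).toList.length := by omega
    have hm : ((PySem.Int.toStr num).toList.length : Int) - k + 1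
        = (((PySem.Int.toStr num).toList.length + 1 - k.toNat : Nat) : Int) := by omega
    rw [hm, PySem.List.pyRange_zero_natCast, List.foldl_map]
    have hfun : (fun (acc : Int) (i : Nat) =>
        match PySem.Int.ofStr? (PySem.Str.slice (PySem.Int.toStr num) (some (i : Int)) (some ((i : Int) + k))) with
        | some subInt =>
            if subInt ≠ 0 ∧ PySem.Int.mod num subInt = 0 then acc + 1 else acc
        | none => acc)
        = (fun (acc : Int) (i : Nat) =>
            if hitB num (((PySem.Int.toStr num).toList.drop i).take k.toNat) then acc + 1 else acc) := by
      funext acc i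
      have hik : (i : Int) + k = ((i + k.toNat : Nat) : Int) := by omega
      rw [PySem.Int.ofStr?.eq_1, PySem.Str.toList_slice, PySem.Chars.slice_eq_listSlice,
        hik, PySem.List.slice_natCast, Nat.add_sub_cancel_left]
      cases hc : PySem.Int.ofChars? (List.take k.toNat (List.drop i (PySem.Int.toStr num).toList)) with
      | none =>
        rw [PySem.Int.toList_toStr] at hc
        simp [hitB, hc]
      | some v =>
        rw [PySem.Int.toList_toStr] at hc
        by_cases hv : v ≠ 0 ∧ PySem.Int.mod num v = 0 <;> simp [hitB, hc, hv]
    rw [hfun, PySem.List.foldl_count_if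
      (fun i => hitB num (((PySem.Int.toStr num).toList.drop i).take k.toNat))]
    simp

-- B's map/filter/len over the window list is the same count
lemma portB_count (num k : Int) (hk : 1 ≤ k) :
    divisorSubstrings_alt num k =
      ((List.range ((PySem.Int.toStr num).toList.length + 1 - k.toNat)).countP
        (fun i => hitB num (((PySem.Int.toStr num).toList.drop i).take k.toNat)) : Int) := by
  show ((((windowsB k (PySem.Int.toStr num).toList).map (fun w => PySem.Int.ofChars? w)).filter
      (fun v? => match v? with
        | some v => decide (v ≠ 0 ∧ PySem.Int.mod num v = 0)
        | none => false)).length : Int) = _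
  rw [windowsB_eq k hk, List.map_map, List.filter_map, List.length_map,
    ← List.countP_eq_length_filter]
  rfl

-- ===== VERDICT (by name: the statement is the Claim_ definition above) =====
theorem divisorSubstrings_spec : Claim_equal_divisorSubstrings := by
  intro num k _ hpre
  unfold Spec_divisorSubstrings
  rw [portA_count num k hpre.1, portB_count num k hpre.1]
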